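-- pv_equiv track=rewrite | github.com/anandan1998/SEPM | pygame/gamelogic.py | dfs_walk
-- ===== SOURCE A (Python) =====
-- def dfs_walk(top_matrix, player):
--     grid_size = len(top_matrix)
--     visited = set()
--
--     def dfs(row, col, direction):
--         if row < 0 or row >= grid_size or col < 0 or col >= grid_size:
--             return False
--         if (row, col) in visited or top_matrix[row][col] != player:
--             return False
--
--         visited.add((row, col))
--
--         if direction == 'vertical' and row == grid_size - 1:
--             return True
--         if direction == 'horizontal' and col == grid_size - 1:
--             return True
--
--         if direction == 'vertical':
--             return (dfs(row + 1, col, 'vertical') or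
--                     dfs(row, col - 1, 'vertical') or
--                     dfs(row, col + 1, 'vertical'))
--         elif direction == 'horizontal':
--             return (dfs(row, col + 1, 'horizontal') or
--                     dfs(row - 1, col, 'horizontal') or
--                     dfs(row + 1, col, 'horizontal'))
--
--         return False
--
--     for col in range(grid_size):
--         if top_matrix[0][col] == player:
--             if dfs(0, col, 'vertical'):
--                 return True
--
--     for row in range(grid_size):
--         if top_matrix[row][0] == player:
--             if dfs(row, 0, 'horizontal'):
--                 return True
--
--     return False
-- ===== SOURCE B (Python) =====
-- def dfs_walk(top_matrix, player):
--     # Iterative explicit-stack search instead of recursive DFS; one visited set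
--     # shared by the vertical phase and then the horizontal phase.
--     n = len(top_matrix)
--     visited = set()
--
--     def run(stack, vertical):
--         # stack: top at the END of the list; neighbors are pushed in reverse
--         # priority so pop order matches the intended priority.
--         while stack:
--             r, c = stack.pop()
--             if r < 0 or r >= n or c < 0 or c >= n:
--                 continue
--             if (r, c) in visited or top_matrix[r][c] != player:
--                 continue
--             visited.add((r, c))
--             if vertical:
--                 if r == n - 1:
--                     return True
--                 stack.extend(((r, c + 1), (r, c - 1), (r + 1, c)))
--             else:
--                 if c == n - 1:
--                     return True
--                 stack.extend(((r + 1, c), (r - 1, c), (r, c + 1)))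
--         return False
--
--     seeds_v = [(0, c) for c in range(n - 1, -1, -1) if top_matrix[0][c] == player]
--     if run(seeds_v, True):
--         return True
--     seeds_h = [(r, 0) for r in range(n - 1, -1, -1) if top_matrix[r][0] == player]
--     return run(seeds_h, False)
-- ===== Notes on version B (the rewrite author's own statement) =====
-- stated objective: alternative
-- what changed: Replaces A's recursive DFS (nested dfs closure, per-seed calls with or-chains) by an explicit stack-based iterative loop: all seeds of a phase are pushed up front and one while-loop pops cells and pushes directional neighbors, sharing one visited set across both phases.
-- outside the precondition, e.g. on dfs_walk([[-1], [-1], [-1], [-1], [-1], [-1], [-1]], -1): A returns True, B raises IndexError; on dfs_walk([[0, 0], [7]], 5): A returns False, B returns False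
import Mathlib
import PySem

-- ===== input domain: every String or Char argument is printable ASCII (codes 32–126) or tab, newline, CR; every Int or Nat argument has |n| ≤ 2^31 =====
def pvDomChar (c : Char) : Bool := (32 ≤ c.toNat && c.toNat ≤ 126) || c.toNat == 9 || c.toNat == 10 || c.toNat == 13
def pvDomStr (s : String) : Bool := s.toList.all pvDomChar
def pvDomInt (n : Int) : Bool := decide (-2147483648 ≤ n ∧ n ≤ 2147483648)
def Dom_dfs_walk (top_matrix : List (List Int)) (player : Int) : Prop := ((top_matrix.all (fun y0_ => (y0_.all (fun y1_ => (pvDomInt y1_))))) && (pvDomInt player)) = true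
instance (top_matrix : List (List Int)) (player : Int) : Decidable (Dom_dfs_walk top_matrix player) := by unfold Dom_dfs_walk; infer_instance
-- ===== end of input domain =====

-- B rewrites A's recursive DFS as an explicit stack-based iterative search (same
-- shared visited set across both phases); equal return value, no recursion.

-- raw cell access top_matrix[r][c]; the default (player+1) is never hit on Pre_ inputs
def pvCell (m : List (List Int)) (pl r c : Int) : Int :=
  (m.getD r.toNat []).getD c.toNat (pl + 1)

-- all in-bounds cells (termination measure support)
def pvAllCells (m : List (List Int)) : List (Int × Int) :=
  ((List.range m.length).product (List.range m.length)).map (fun p => ((p.1 : Int), (p.2 : Int)))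

-- number of in-bounds cells not yet visited
def pvUnvis (m : List (List Int)) (v : List (Int × Int)) : Nat :=
  ((pvAllCells m).filter (fun p => decide (p ∉ v))).length

theorem pvFilterLe {α : Type} (P Q : α → Bool) (h : ∀ x, P x = true → Q x = true) :
    ∀ L : List α, (L.filter P).length ≤ (L.filter Q).length := by
  intro L
  induction L with
  | nil => simp
  | cons y t ih =>
    rw [List.filter_cons, List.filter_cons]
    cases hy : P y
    · cases hq : Q y
      · simpa using ih
      · simp only [if_neg Bool.false_ne_true]
        exact Nat.le_succ_of_le ih
    · rw [h y hy]
      simpa using ih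

theorem pvFilterLt {α : Type} (P Q : α → Bool) (h : ∀ x, P x = true → Q x = true) :
    ∀ (L : List α) (x : α), x ∈ L → Q x = true → P x = false →
      (L.filter P).length < (L.filter Q).length := by
  intro L
  induction L with
  | nil => intro x hx; cases hx
  | cons y t ih =>
    intro x hx hQ hP
    rw [List.filter_cons, List.filter_cons]
    rcases List.mem_cons.mp hx with rfl | hxt
    · rw [hP, hQ]
      simp only [if_neg Bool.false_ne_true]
      exact Nat.lt_succ_of_le (pvFilterLe P Q h t)
    · have hlt := ih x hxt hQ hP
      cases hy : P y
      · cases hq : Q y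
        · simpa using hlt
        · simp only [if_neg Bool.false_ne_true]
          exact Nat.lt_succ_of_lt hlt
      · rw [h y hy]
        simpa using hlt

theorem pvMemAll (m : List (List Int)) (r c : Int) (h0 : 0 ≤ r) (h1 : r < (m.length : Int))
    (h2 : 0 ≤ c) (h3 : c < (m.length : Int)) : (r, c) ∈ pvAllCells m := by
  unfold pvAllCells
  simp only [List.mem_map, List.pair_mem_product, List.mem_range, Prod.exists]
  exact ⟨r.toNat, c.toNat, ⟨by omega, by omega⟩, by
    simp [Int.toNat_of_nonneg h0, Int.toNat_of_nonneg h2]⟩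

theorem pvUnvis_push (m : List (List Int)) (v w : List (Int × Int)) (r c : Int)
    (h0 : 0 ≤ r) (h1 : r < (m.length : Int)) (h2 : 0 ≤ c) (h3 : c < (m.length : Int))
    (hv : (r, c) ∉ v) (hsub : ∀ p, p ∈ (r, c) :: v → p ∈ w) :
    pvUnvis m w < pvUnvis m v := by
  unfold pvUnvis
  apply pvFilterLt
  · intro x hx
    simp only [decide_eq_true_eq] at hx ⊢
    intro hxv; exact hx (hsub x (List.mem_cons_of_mem _ hxv))
  · exact pvMemAll m r c h0 h1 h2 h3
  · simpa using hv
  · simp [hsub (r, c) (List.mem_cons_self)]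

-- ===== PORT A =====
-- A's recursive dfs; visited is threaded, the second component is the list of
-- NEWLY visited cells (newest first), so callers extend visited with `a ++ v`.
def pvDfsA (m : List (List Int)) (pl : Int) (vert : Bool) (v : List (Int × Int)) (r c : Int) :
    Bool × List (Int × Int) :=
  if h1 : r < 0 ∨ (m.length : Int) ≤ r ∨ c < 0 ∨ (m.length : Int) ≤ c then (false, [])
  else if h2 : (r, c) ∈ v ∨ pvCell m pl r c ≠ pl then (false, [])
  else if vert = true then
    if r = (m.length : Int) - 1 then (true, [(r, c)])
    else
      match pvDfsA m pl vert ((r, c) :: v) (r + 1) c with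
      | (true, a1) => (true, a1 ++ [(r, c)])
      | (false, a1) =>
        match pvDfsA m pl vert (a1 ++ (r, c) :: v) r (c - 1) with
        | (true, a2) => (true, a2 ++ a1 ++ [(r, c)])
        | (false, a2) =>
          match pvDfsA m pl vert (a2 ++ (a1 ++ (r, c) :: v)) r (c + 1) with
          | (true, a3) => (true, a3 ++ a2 ++ a1 ++ [(r, c)])
          | (false, a3) => (false, a3 ++ a2 ++ a1 ++ [(r, c)])
  else
    if c = (m.length : Int) - 1 then (true, [(r, c)])
    else
      match pvDfsA m pl vert ((r, c) :: v) r (c + 1) with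
      | (true, a1) => (true, a1 ++ [(r, c)])
      | (false, a1) =>
        match pvDfsA m pl vert (a1 ++ (r, c) :: v) (r - 1) c with
        | (true, a2) => (true, a2 ++ a1 ++ [(r, c)])
        | (false, a2) =>
          match pvDfsA m pl vert (a2 ++ (a1 ++ (r, c) :: v)) (r + 1) c with
          | (true, a3) => (true, a3 ++ a2 ++ a1 ++ [(r, c)])
          | (false, a3) => (false, a3 ++ a2 ++ a1 ++ [(r, c)])
termination_by pvUnvis m v
decreasing_by
  all_goals
    push Not at h1 h2
    refine pvUnvis_push m v _ r c h1.1 h1.2.1 h1.2.2.1 h1.2.2.2 h2.1 ?_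
    all_goals intro p hp; simp only [List.mem_cons, List.mem_append] at hp ⊢; tauto

-- A's seed loops (for col in range(n): if top_matrix[0][col]==player: dfs(...))
def pvSeedA (m : List (List Int)) (pl : Int) (vert : Bool) (idxs : List Int)
    (v : List (Int × Int)) : Bool × List (Int × Int) :=
  match idxs with
  | [] => (false, v)
  | i :: is =>
    if pvCell m pl (if vert then 0 else i) (if vert then i else 0) = pl then
      match pvDfsA m pl vert v (if vert then 0 else i) (if vert then i else 0) with
      | (true, _) => (true, v)
      | (false, a) => pvSeedA m pl vert is (a ++ v)
    else pvSeedA m pl vert is v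

def dfs_walk (top_matrix : List (List Int)) (player : Int) : Bool :=
  match pvSeedA top_matrix player true (PySem.List.pyRange 0 (top_matrix.length : Int) 1) [] with
  | (true, _) => true
  | (false, v) => (pvSeedA top_matrix player false (PySem.List.pyRange 0 (top_matrix.length : Int) 1) v).1

-- ===== PORT B =====
-- B's iterative stack loop (stack top = list head; neighbors pushed in priority order)
def pvRunB (m : List (List Int)) (pl : Int) (vert : Bool) (v : List (Int × Int))
    (stack : List (Int × Int)) : Bool × List (Int × Int) :=
  match stack with
  | [] => (false, v)
  | (r, c) :: s =>
    if h1 : r < 0 ∨ (m.length : Int) ≤ r ∨ c < 0 ∨ (m.length : Int) ≤ c then pvRunB m pl vert v s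
    else if h2 : (r, c) ∈ v ∨ pvCell m pl r c ≠ pl then pvRunB m pl vert v s
    else if vert = true then
      if r = (m.length : Int) - 1 then (true, (r, c) :: v)
      else pvRunB m pl vert ((r, c) :: v) ((r + 1, c) :: (r, c - 1) :: (r, c + 1) :: s)
    else
      if c = (m.length : Int) - 1 then (true, (r, c) :: v)
      else pvRunB m pl vert ((r, c) :: v) ((r, c + 1) :: (r - 1, c) :: (r + 1, c) :: s)
termination_by (pvUnvis m v, stack.length)
decreasing_by
  · apply Prod.Lex.right; simp
  · apply Prod.Lex.right; simp
  · apply Prod.Lex.left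
    push Not at h1 h2
    exact pvUnvis_push m v _ r c h1.1 h1.2.1 h1.2.2.1 h1.2.2.2 h2.1 (fun p hp => hp)
  · apply Prod.Lex.left
    push Not at h1 h2
    exact pvUnvis_push m v _ r c h1.1 h1.2.1 h1.2.2.1 h1.2.2.2 h2.1 (fun p hp => hp)

-- B's seed lists: the player cells of the top row / left column
def pvSeedsB (m : List (List Int)) (pl : Int) (vert : Bool) (idxs : List Int) :
    List (Int × Int) :=
  (idxs.filter (fun i => pvCell m pl (if vert then 0 else i) (if vert then i else 0) = pl)).map
    (fun i => (if vert then (0 : Int) else i, if vert then i else (0 : Int)))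

def dfs_walk_alt (top_matrix : List (List Int)) (player : Int) : Bool :=
  match pvRunB top_matrix player true [] (pvSeedsB top_matrix player true (PySem.List.pyRange 0 (top_matrix.length : Int) 1)) with
  | (true, _) => true
  | (false, v) => (pvRunB top_matrix player false v (pvSeedsB top_matrix player false (PySem.List.pyRange 0 (top_matrix.length : Int) 1))).1

-- ===== PRECONDITION & SPEC =====
-- Pre_ excludes ragged matrices with a row shorter than len(top_matrix): there
-- Python A indexes past a row's end and (on the reached cells) raises IndexError.
def Pre_dfs_walk (top_matrix : List (List Int)) (player : Int) : Prop :=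
  ∀ row ∈ top_matrix, top_matrix.length ≤ row.length
instance (top_matrix : List (List Int)) (player : Int) : Decidable (Pre_dfs_walk top_matrix player) := by unfold Pre_dfs_walk; infer_instance
def pvWitness_dfs_walk : List (List Int) × Int := ([[5, 0], [5, 5]], 5)

def Spec_dfs_walk (top_matrix : List (List Int)) (player : Int) (out : Bool) : Prop := out = dfs_walk_alt top_matrix player
instance (top_matrix : List (List Int)) (player : Int) (out : Bool) : Decidable (Spec_dfs_walk top_matrix player out) := by unfold Spec_dfs_walk; infer_instance

-- ===== CLAIM (what is proved, stated in full; the proofs are below) =====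
def Claim_equal_dfs_walk : Prop := ∀ (top_matrix : List (List Int)) (player : Int), Dom_dfs_walk top_matrix player → Pre_dfs_walk top_matrix player → Spec_dfs_walk top_matrix player (dfs_walk top_matrix player)

-- ===== LEMMAS AND PROOFS =====

theorem pvUnvis_append_le (m : List (List Int)) (a v : List (Int × Int)) :
    pvUnvis m (a ++ v) ≤ pvUnvis m v := by
  unfold pvUnvis
  apply pvFilterLe
  intro x hx
  simp only [decide_eq_true_eq, List.mem_append] at hx ⊢
  intro hxv; exact hx (Or.inr hxv)


theorem dfsA_oob (m : List (List Int)) (pl : Int) (vert : Bool) (v : List (Int × Int)) (r c : Int)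
    (h1 : r < 0 ∨ (m.length : Int) ≤ r ∨ c < 0 ∨ (m.length : Int) ≤ c) :
    pvDfsA m pl vert v r c = (false, []) := by
  rw [pvDfsA]; rw [dif_pos h1]

theorem dfsA_seen (m : List (List Int)) (pl : Int) (vert : Bool) (v : List (Int × Int)) (r c : Int)
    (h1 : ¬(r < 0 ∨ (m.length : Int) ≤ r ∨ c < 0 ∨ (m.length : Int) ≤ c))
    (h2 : (r, c) ∈ v ∨ pvCell m pl r c ≠ pl) :
    pvDfsA m pl vert v r c = (false, []) := by
  rw [pvDfsA]; rw [dif_neg h1, dif_pos h2]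

theorem dfsA_target_v (m : List (List Int)) (pl : Int) (v : List (Int × Int)) (r c : Int)
    (h1 : ¬(r < 0 ∨ (m.length : Int) ≤ r ∨ c < 0 ∨ (m.length : Int) ≤ c))
    (h2 : ¬((r, c) ∈ v ∨ pvCell m pl r c ≠ pl)) (ht : r = (m.length : Int) - 1) :
    pvDfsA m pl true v r c = (true, [(r, c)]) := by
  rw [pvDfsA]; rw [dif_neg h1, dif_neg h2, if_pos rfl, if_pos ht]

theorem dfsA_target_h (m : List (List Int)) (pl : Int) (v : List (Int × Int)) (r c : Int)
    (h1 : ¬(r < 0 ∨ (m.length : Int) ≤ r ∨ c < 0 ∨ (m.length : Int) ≤ c))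
    (h2 : ¬((r, c) ∈ v ∨ pvCell m pl r c ≠ pl)) (ht : c = (m.length : Int) - 1) :
    pvDfsA m pl false v r c = (true, [(r, c)]) := by
  rw [pvDfsA]; rw [dif_neg h1, dif_neg h2, if_neg Bool.false_ne_true, if_pos ht]

theorem dfsA_expand_v (m : List (List Int)) (pl : Int) (v : List (Int × Int)) (r c : Int)
    (h1 : ¬(r < 0 ∨ (m.length : Int) ≤ r ∨ c < 0 ∨ (m.length : Int) ≤ c))
    (h2 : ¬((r, c) ∈ v ∨ pvCell m pl r c ≠ pl)) (ht : ¬r = (m.length : Int) - 1) :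
    pvDfsA m pl true v r c =
      (match pvDfsA m pl true ((r, c) :: v) (r + 1) c with
       | (true, a1) => (true, a1 ++ [(r, c)])
       | (false, a1) =>
         match pvDfsA m pl true (a1 ++ (r, c) :: v) r (c - 1) with
         | (true, a2) => (true, a2 ++ a1 ++ [(r, c)])
         | (false, a2) =>
           match pvDfsA m pl true (a2 ++ (a1 ++ (r, c) :: v)) r (c + 1) with
           | (true, a3) => (true, a3 ++ a2 ++ a1 ++ [(r, c)])
           | (false, a3) => (false, a3 ++ a2 ++ a1 ++ [(r, c)])) := by
  rw [pvDfsA]; rw [dif_neg h1, dif_neg h2, if_pos rfl, if_neg ht]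

theorem dfsA_expand_h (m : List (List Int)) (pl : Int) (v : List (Int × Int)) (r c : Int)
    (h1 : ¬(r < 0 ∨ (m.length : Int) ≤ r ∨ c < 0 ∨ (m.length : Int) ≤ c))
    (h2 : ¬((r, c) ∈ v ∨ pvCell m pl r c ≠ pl)) (ht : ¬c = (m.length : Int) - 1) :
    pvDfsA m pl false v r c =
      (match pvDfsA m pl false ((r, c) :: v) r (c + 1) with
       | (true, a1) => (true, a1 ++ [(r, c)])
       | (false, a1) =>
         match pvDfsA m pl false (a1 ++ (r, c) :: v) (r - 1) c with
         | (true, a2) => (true, a2 ++ a1 ++ [(r, c)])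
         | (false, a2) =>
           match pvDfsA m pl false (a2 ++ (a1 ++ (r, c) :: v)) (r + 1) c with
           | (true, a3) => (true, a3 ++ a2 ++ a1 ++ [(r, c)])
           | (false, a3) => (false, a3 ++ a2 ++ a1 ++ [(r, c)])) := by
  rw [pvDfsA]; rw [dif_neg h1, dif_neg h2, if_neg Bool.false_ne_true, if_neg ht]

theorem runB_nil (m : List (List Int)) (pl : Int) (vert : Bool) (v : List (Int × Int)) :
    pvRunB m pl vert v [] = (false, v) := by
  rw [pvRunB]

theorem runB_oob (m : List (List Int)) (pl : Int) (vert : Bool) (v : List (Int × Int))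
    (r c : Int) (s : List (Int × Int))
    (h1 : r < 0 ∨ (m.length : Int) ≤ r ∨ c < 0 ∨ (m.length : Int) ≤ c) :
    pvRunB m pl vert v ((r, c) :: s) = pvRunB m pl vert v s := by
  rw [pvRunB]; rw [dif_pos h1]

theorem runB_seen (m : List (List Int)) (pl : Int) (vert : Bool) (v : List (Int × Int))
    (r c : Int) (s : List (Int × Int))
    (h1 : ¬(r < 0 ∨ (m.length : Int) ≤ r ∨ c < 0 ∨ (m.length : Int) ≤ c))
    (h2 : (r, c) ∈ v ∨ pvCell m pl r c ≠ pl) :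
    pvRunB m pl vert v ((r, c) :: s) = pvRunB m pl vert v s := by
  rw [pvRunB]; rw [dif_neg h1, dif_pos h2]

theorem runB_target_v (m : List (List Int)) (pl : Int) (v : List (Int × Int))
    (r c : Int) (s : List (Int × Int))
    (h1 : ¬(r < 0 ∨ (m.length : Int) ≤ r ∨ c < 0 ∨ (m.length : Int) ≤ c))
    (h2 : ¬((r, c) ∈ v ∨ pvCell m pl r c ≠ pl)) (ht : r = (m.length : Int) - 1) :
    pvRunB m pl true v ((r, c) :: s) = (true, (r, c) :: v) := by
  rw [pvRunB]; rw [dif_neg h1, dif_neg h2, if_pos rfl, if_pos ht]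

theorem runB_target_h (m : List (List Int)) (pl : Int) (v : List (Int × Int))
    (r c : Int) (s : List (Int × Int))
    (h1 : ¬(r < 0 ∨ (m.length : Int) ≤ r ∨ c < 0 ∨ (m.length : Int) ≤ c))
    (h2 : ¬((r, c) ∈ v ∨ pvCell m pl r c ≠ pl)) (ht : c = (m.length : Int) - 1) :
    pvRunB m pl false v ((r, c) :: s) = (true, (r, c) :: v) := by
  rw [pvRunB]; rw [dif_neg h1, dif_neg h2, if_neg Bool.false_ne_true, if_pos ht]

theorem runB_expand_v (m : List (List Int)) (pl : Int) (v : List (Int × Int))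
    (r c : Int) (s : List (Int × Int))
    (h1 : ¬(r < 0 ∨ (m.length : Int) ≤ r ∨ c < 0 ∨ (m.length : Int) ≤ c))
    (h2 : ¬((r, c) ∈ v ∨ pvCell m pl r c ≠ pl)) (ht : ¬r = (m.length : Int) - 1) :
    pvRunB m pl true v ((r, c) :: s) =
      pvRunB m pl true ((r, c) :: v) ((r + 1, c) :: (r, c - 1) :: (r, c + 1) :: s) := by
  rw [pvRunB]; rw [dif_neg h1, dif_neg h2, if_pos rfl, if_neg ht]

theorem runB_expand_h (m : List (List Int)) (pl : Int) (v : List (Int × Int))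
    (r c : Int) (s : List (Int × Int))
    (h1 : ¬(r < 0 ∨ (m.length : Int) ≤ r ∨ c < 0 ∨ (m.length : Int) ≤ c))
    (h2 : ¬((r, c) ∈ v ∨ pvCell m pl r c ≠ pl)) (ht : ¬c = (m.length : Int) - 1) :
    pvRunB m pl false v ((r, c) :: s) =
      pvRunB m pl false ((r, c) :: v) ((r, c + 1) :: (r - 1, c) :: (r + 1, c) :: s) := by
  rw [pvRunB]; rw [dif_neg h1, dif_neg h2, if_neg Bool.false_ne_true, if_neg ht]

theorem pvKey (m : List (List Int)) (pl : Int) (vert : Bool) :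
    ∀ k v, pvUnvis m v ≤ k → ∀ r c s,
      ((pvDfsA m pl vert v r c).1 = true → (pvRunB m pl vert v ((r, c) :: s)).1 = true) ∧
      ((pvDfsA m pl vert v r c).1 = false →
        pvRunB m pl vert v ((r, c) :: s) = pvRunB m pl vert ((pvDfsA m pl vert v r c).2 ++ v) s) := by
  intro k
  induction k using Nat.strong_induction_on with
  | _ k IH =>
    intro v hk r c s
    by_cases h1 : r < 0 ∨ (m.length : Int) ≤ r ∨ c < 0 ∨ (m.length : Int) ≤ c
    · rw [dfsA_oob m pl vert v r c h1]
      refine ⟨fun ht => by simp at ht, fun _ => ?_⟩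
      rw [runB_oob m pl vert v r c s h1]
      simp
    · by_cases h2 : (r, c) ∈ v ∨ pvCell m pl r c ≠ pl
      · rw [dfsA_seen m pl vert v r c h1 h2]
        refine ⟨fun ht => by simp at ht, fun _ => ?_⟩
        rw [runB_seen m pl vert v r c s h1 h2]
        simp
      · have hb1 : ¬r < 0 := fun h => h1 (Or.inl h)
        have hb2 : ¬(m.length : Int) ≤ r := fun h => h1 (Or.inr (Or.inl h))
        have hb3 : ¬c < 0 := fun h => h1 (Or.inr (Or.inr (Or.inl h)))
        have hb4 : ¬(m.length : Int) ≤ c := fun h => h1 (Or.inr (Or.inr (Or.inr h)))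
        have hnv : (r, c) ∉ v := fun h => h2 (Or.inl h)
        have hvlt : pvUnvis m ((r, c) :: v) < pvUnvis m v :=
          pvUnvis_push m v _ r c (by omega) (by omega) (by omega) (by omega) hnv (fun p hp => hp)
        cases vert with
        | true =>
          by_cases htg : r = (m.length : Int) - 1
          · rw [dfsA_target_v m pl v r c h1 h2 htg]
            refine ⟨fun _ => ?_, fun hf => by simp at hf⟩
            rw [runB_target_v m pl v r c s h1 h2 htg]
          · rw [dfsA_expand_v m pl v r c h1 h2 htg, runB_expand_v m pl v r c s h1 h2 htg]
            have IH1 := IH (pvUnvis m ((r, c) :: v)) (lt_of_lt_of_le hvlt hk) ((r, c) :: v) le_rfl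
              (r + 1) c ((r, c - 1) :: (r, c + 1) :: s)
            rcases e1 : pvDfsA m pl true ((r, c) :: v) (r + 1) c with ⟨b1, a1⟩
            rw [e1] at IH1
            cases b1 with
            | true =>
              exact ⟨fun _ => IH1.1 rfl, fun hf => by simp at hf⟩
            | false =>
              have E1 := IH1.2 rfl
              have hlt1 : pvUnvis m (a1 ++ (r, c) :: v) < pvUnvis m v :=
                lt_of_le_of_lt (pvUnvis_append_le m a1 _) hvlt
              have IH2 := IH (pvUnvis m (a1 ++ (r, c) :: v)) (lt_of_lt_of_le hlt1 hk)
                (a1 ++ (r, c) :: v) le_rfl r (c - 1) ((r, c + 1) :: s)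
              rcases e2 : pvDfsA m pl true (a1 ++ (r, c) :: v) r (c - 1) with ⟨b2, a2⟩
              rw [e2] at IH2
              cases b2 with
              | true =>
                simp only [e2]
                refine ⟨fun _ => ?_, fun hf => by simp at hf⟩
                rw [E1]
                exact IH2.1 rfl
              | false =>
                have E2 := IH2.2 rfl
                have hlt2 : pvUnvis m (a2 ++ (a1 ++ (r, c) :: v)) < pvUnvis m v :=
                  lt_of_le_of_lt (pvUnvis_append_le m a2 _) hlt1
                have IH3 := IH (pvUnvis m (a2 ++ (a1 ++ (r, c) :: v))) (lt_of_lt_of_le hlt2 hk)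
                  (a2 ++ (a1 ++ (r, c) :: v)) le_rfl r (c + 1) s
                rcases e3 : pvDfsA m pl true (a2 ++ (a1 ++ (r, c) :: v)) r (c + 1) with ⟨b3, a3⟩
                rw [e3] at IH3
                cases b3 with
                | true =>
                  simp only [e2, e3]
                  refine ⟨fun _ => ?_, fun hf => by simp at hf⟩
                  rw [E1, E2]
                  exact IH3.1 rfl
                | false =>
                  simp only [e2, e3]
                  refine ⟨fun ht => by simp at ht, fun _ => ?_⟩
                  rw [E1, E2, IH3.2 rfl]
                  simp [List.append_assoc]
        | false =>
          by_cases htg : c = (m.length : Int) - 1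
          · rw [dfsA_target_h m pl v r c h1 h2 htg]
            refine ⟨fun _ => ?_, fun hf => by simp at hf⟩
            rw [runB_target_h m pl v r c s h1 h2 htg]
          · rw [dfsA_expand_h m pl v r c h1 h2 htg, runB_expand_h m pl v r c s h1 h2 htg]
            have IH1 := IH (pvUnvis m ((r, c) :: v)) (lt_of_lt_of_le hvlt hk) ((r, c) :: v) le_rfl
              r (c + 1) ((r - 1, c) :: (r + 1, c) :: s)
            rcases e1 : pvDfsA m pl false ((r, c) :: v) r (c + 1) with ⟨b1, a1⟩
            rw [e1] at IH1
            cases b1 with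
            | true =>
              exact ⟨fun _ => IH1.1 rfl, fun hf => by simp at hf⟩
            | false =>
              have E1 := IH1.2 rfl
              have hlt1 : pvUnvis m (a1 ++ (r, c) :: v) < pvUnvis m v :=
                lt_of_le_of_lt (pvUnvis_append_le m a1 _) hvlt
              have IH2 := IH (pvUnvis m (a1 ++ (r, c) :: v)) (lt_of_lt_of_le hlt1 hk)
                (a1 ++ (r, c) :: v) le_rfl (r - 1) c ((r + 1, c) :: s)
              rcases e2 : pvDfsA m pl false (a1 ++ (r, c) :: v) (r - 1) c with ⟨b2, a2⟩
              rw [e2] at IH2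
              cases b2 with
              | true =>
                simp only [e2]
                refine ⟨fun _ => ?_, fun hf => by simp at hf⟩
                rw [E1]
                exact IH2.1 rfl
              | false =>
                have E2 := IH2.2 rfl
                have hlt2 : pvUnvis m (a2 ++ (a1 ++ (r, c) :: v)) < pvUnvis m v :=
                  lt_of_le_of_lt (pvUnvis_append_le m a2 _) hlt1
                have IH3 := IH (pvUnvis m (a2 ++ (a1 ++ (r, c) :: v))) (lt_of_lt_of_le hlt2 hk)
                  (a2 ++ (a1 ++ (r, c) :: v)) le_rfl (r + 1) c s
                rcases e3 : pvDfsA m pl false (a2 ++ (a1 ++ (r, c) :: v)) (r + 1) c with ⟨b3, a3⟩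
                rw [e3] at IH3
                cases b3 with
                | true =>
                  simp only [e2, e3]
                  refine ⟨fun _ => ?_, fun hf => by simp at hf⟩
                  rw [E1, E2]
                  exact IH3.1 rfl
                | false =>
                  simp only [e2, e3]
                  refine ⟨fun ht => by simp at ht, fun _ => ?_⟩
                  rw [E1, E2, IH3.2 rfl]
                  simp [List.append_assoc]

theorem pvSeedKey (m : List (List Int)) (pl : Int) (vert : Bool) :
    ∀ (idxs : List Int) (v : List (Int × Int)),
      (∀ x, pvSeedA m pl vert idxs v = (true, x) →
        (pvRunB m pl vert v (pvSeedsB m pl vert idxs)).1 = true) ∧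
      (∀ w, pvSeedA m pl vert idxs v = (false, w) →
        pvRunB m pl vert v (pvSeedsB m pl vert idxs) = (false, w)) := by
  intro idxs
  induction idxs with
  | nil =>
    intro v
    constructor
    · intro x hx
      simp [pvSeedA] at hx
    · intro w hw
      simp [pvSeedA] at hw
      simp only [pvSeedsB, List.filter_nil, List.map_nil]
      rw [runB_nil, hw]
  | cons i is ih =>
    intro v
    by_cases hc : pvCell m pl (if vert then 0 else i) (if vert then i else 0) = pl
    · have hseeds : pvSeedsB m pl vert (i :: is) =
          ((if vert then (0 : Int) else i, if vert then i else (0 : Int))) :: pvSeedsB m pl vert is := by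
        simp [pvSeedsB, hc]
      have K := pvKey m pl vert (pvUnvis m v) v le_rfl (if vert then 0 else i)
        (if vert then i else 0) (pvSeedsB m pl vert is)
      rcases e : pvDfsA m pl vert v (if vert then 0 else i) (if vert then i else 0) with ⟨b, a⟩
      rw [e] at K
      have hsA : pvSeedA m pl vert (i :: is) v =
          (match (b, a) with
           | (true, _) => (true, v)
           | (false, a) => pvSeedA m pl vert is (a ++ v)) := by
        rw [pvSeedA, if_pos hc, e]
      cases b with
      | true =>
        constructor
        · intro x _
          rw [hseeds]
          exact K.1 rfl
        · intro w hw
          rw [hsA] at hw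
          simp at hw
      | false =>
        have E := K.2 rfl
        rw [hsA]
        constructor
        · intro x hx
          rw [hseeds, E]
          exact (ih (a ++ v)).1 x hx
        · intro w hw
          rw [hseeds, E]
          exact (ih (a ++ v)).2 w hw
    · have hseeds : pvSeedsB m pl vert (i :: is) = pvSeedsB m pl vert is := by
        simp [pvSeedsB, hc]
      have hsA : pvSeedA m pl vert (i :: is) v = pvSeedA m pl vert is v := by
        rw [pvSeedA, if_neg hc]
      rw [hseeds, hsA]
      exact ih v

-- ===== VERDICT (by name: the statement is the Claim_ definition above) =====
theorem dfs_walk_spec : Claim_equal_dfs_walk := by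
  intro m pl _ _
  unfold Spec_dfs_walk dfs_walk dfs_walk_alt
  rcases h1 : pvSeedA m pl true (PySem.List.pyRange 0 (m.length : Int) 1) [] with ⟨b1, w1⟩
  cases b1 with
  | true =>
    have hr := (pvSeedKey m pl true (PySem.List.pyRange 0 (m.length : Int) 1) []).1 w1 h1
    rcases h2 : pvRunB m pl true [] (pvSeedsB m pl true (PySem.List.pyRange 0 (m.length : Int) 1)) with ⟨bb, vv⟩
    rw [h2] at hr
    simp at hr
    subst hr
    rfl
  | false =>
    have E := (pvSeedKey m pl true (PySem.List.pyRange 0 (m.length : Int) 1) []).2 w1 h1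
    simp only [E]
    rcases h3 : pvSeedA m pl false (PySem.List.pyRange 0 (m.length : Int) 1) w1 with ⟨b2, w2⟩
    cases b2 with
    | true =>
      have hr := (pvSeedKey m pl false (PySem.List.pyRange 0 (m.length : Int) 1) w1).1 w2 h3
      rcases h4 : pvRunB m pl false w1 (pvSeedsB m pl false (PySem.List.pyRange 0 (m.length : Int) 1)) with ⟨bb, vv⟩
      rw [h4] at hr
      simp at hr
      subst hr
      rfl
    | false =>
      have E2 := (pvSeedKey m pl false (PySem.List.pyRange 0 (m.length : Int) 1) w1).2 w2 h3
      simp only [E2]
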